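-- pv_equiv track=rewrite | github.com/HierroPagotto/HokamaTowerDefense | main.py | calcular_mapa_dano
-- ===== SOURCE A (Python) =====
-- def calcular_mapa_dano(tabuleiro):
--     n = len(tabuleiro)
--     dano_mapa = [[0 for _ in range(n)] for _ in range(n)]
--     for i in range(n):
--         for j in range(n):
--             if tabuleiro[i][j] == 'T':
--                 for dx, dy in [(-1, -1), (-1, 1), (1, -1), (1, 1)]:
--                     ni, nj = i + dx, j + dy
--                     if 0 <= ni < n and 0 <= nj < n and tabuleiro[ni][nj] != 'T':
--                         dano_mapa[ni][nj] += 10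
--     return dano_mapa
-- ===== SOURCE B (Python) =====
-- def calcular_mapa_dano(tabuleiro):
--     n = len(tabuleiro)
--     resultado = []
--     for a in range(n):
--         linha = []
--         for b in range(n):
--             if tabuleiro[a][b] == 'T':
--                 linha.append(0)
--             else:
--                 vizinhos = 0
--                 for da, db in ((-1, -1), (-1, 1), (1, -1), (1, 1)):
--                     x, y = a + da, b + db
--                     if 0 <= x < n and 0 <= y < n and tabuleiro[x][y] == 'T':
--                         vizinhos += 1
--                 linha.append(10 * vizinhos)
--         resultado.append(linha)
--     return resultado
-- ===== Notes on version B (the rewrite author's own statement) =====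
-- stated objective: alternative
-- what changed: Replaces A's scatter pass (towers push +10 into a pre-built mutable grid via in-place increments) with a gather pass that directly builds each output cell as 10 times the count of in-bounds diagonal 'T' neighbors, needing no pre-allocated accumulator matrix.
import Mathlib
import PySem

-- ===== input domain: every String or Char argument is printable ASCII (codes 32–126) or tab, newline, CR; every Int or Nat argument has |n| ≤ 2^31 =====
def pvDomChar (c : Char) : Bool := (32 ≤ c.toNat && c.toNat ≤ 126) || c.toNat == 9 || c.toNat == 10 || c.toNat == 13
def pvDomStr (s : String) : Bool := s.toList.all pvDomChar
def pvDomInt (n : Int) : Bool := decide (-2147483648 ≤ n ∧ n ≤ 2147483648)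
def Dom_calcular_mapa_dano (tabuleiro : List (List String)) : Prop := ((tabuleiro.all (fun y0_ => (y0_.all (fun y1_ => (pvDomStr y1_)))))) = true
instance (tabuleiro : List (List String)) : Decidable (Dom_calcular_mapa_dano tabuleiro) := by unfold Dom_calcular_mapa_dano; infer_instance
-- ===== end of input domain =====

-- B replaces A's scatter pass (each tower pushes +10 into a mutable damage grid) by a gather
-- pass that builds each output cell directly as 10 * (number of in-bounds diagonal 'T' neighbors);
-- same return value on every grid A accepts (objective: alternative decomposition, same cost).

-- ===== PORT A =====
-- A-side helpers: pvAdd is `dano_mapa[x][y] += 10`; the three step functions are A's three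
-- nested loops, transcribed one loop = one fold.  Cell reads `tabuleiro[i][j]` are done with
-- `getD`, exact on Pre_ (every index issued is then in range).
def pvAdd (m : List (List Int)) (x y : Nat) : List (List Int) :=
  m.modify x (fun row => row.modify y (· + 10))

def pvA_offs : List (Int × Int) := [(-1, -1), (-1, 1), (1, -1), (1, 1)]

def pvA_dstep (tabuleiro : List (List String)) (n i j : Nat)
    (m : List (List Int)) (d : Int × Int) : List (List Int) :=
  let ni : Int := (i : Int) + d.1
  let nj : Int := (j : Int) + d.2
  if 0 ≤ ni ∧ ni < (n : Int) ∧ 0 ≤ nj ∧ nj < (n : Int) ∧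
      (tabuleiro.getD ni.toNat []).getD nj.toNat "" ≠ "T" then
    pvAdd m ni.toNat nj.toNat
  else m

def pvA_jstep (tabuleiro : List (List String)) (n i : Nat)
    (m : List (List Int)) (j : Nat) : List (List Int) :=
  if (tabuleiro.getD i []).getD j "" = "T" then
    pvA_offs.foldl (pvA_dstep tabuleiro n i j) m
  else m

def pvA_istep (tabuleiro : List (List String)) (n : Nat)
    (m : List (List Int)) (i : Nat) : List (List Int) :=
  (List.range n).foldl (pvA_jstep tabuleiro n i) m

def calcular_mapa_dano (tabuleiro : List (List String)) : List (List Int) :=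
  let n := tabuleiro.length
  (List.range n).foldl (pvA_istep tabuleiro n)
    ((List.range n).map (fun _ => (List.range n).map (fun _ => (0 : Int))))

-- ===== PORT B =====
-- B-side helper: the inner neighbor-counting loop of Source B.
def pvB_offs : List (Int × Int) := [(-1, -1), (-1, 1), (1, -1), (1, 1)]

def pvB_viz (tabuleiro : List (List String)) (n a b : Nat) : Int :=
  pvB_offs.foldl (fun c d =>
    let x : Int := (a : Int) + d.1
    let y : Int := (b : Int) + d.2
    if 0 ≤ x ∧ x < (n : Int) ∧ 0 ≤ y ∧ y < (n : Int) ∧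
        (tabuleiro.getD x.toNat []).getD y.toNat "" = "T" then c + 1 else c) 0

def calcular_mapa_dano_alt (tabuleiro : List (List String)) : List (List Int) :=
  let n := tabuleiro.length
  (List.range n).map (fun a =>
    (List.range n).map (fun b =>
      if (tabuleiro.getD a []).getD b "" = "T" then (0 : Int)
      else 10 * pvB_viz tabuleiro n a b))

-- ===== PRECONDITION & SPEC =====
-- Pre_ excludes exactly the ragged grids (some row shorter than len(tabuleiro)) on which the
-- Python A raises IndexError; B raises there too.
def Pre_calcular_mapa_dano (tabuleiro : List (List String)) : Prop :=
  ∀ row ∈ tabuleiro, tabuleiro.length ≤ row.length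
instance (tabuleiro : List (List String)) : Decidable (Pre_calcular_mapa_dano tabuleiro) := by
  unfold Pre_calcular_mapa_dano; infer_instance

def pvWitness_calcular_mapa_dano : List (List String) := [["T", "."], [".", "."]]

def Spec_calcular_mapa_dano (tabuleiro : List (List String)) (out : List (List Int)) : Prop := out = calcular_mapa_dano_alt tabuleiro
instance (tabuleiro : List (List String)) (out : List (List Int)) : Decidable (Spec_calcular_mapa_dano tabuleiro out) := by unfold Spec_calcular_mapa_dano; infer_instance

-- ===== CLAIM (what is proved, stated in full; the proofs are below) =====
def Claim_equal_calcular_mapa_dano : Prop := ∀ (tabuleiro : List (List String)), Dom_calcular_mapa_dano tabuleiro → Pre_calcular_mapa_dano tabuleiro → Spec_calcular_mapa_dano tabuleiro (calcular_mapa_dano tabuleiro)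

-- ===== LEMMAS AND PROOFS =====

-- `pvEntry m a b` reads cell (a,b) of the damage matrix; `pvShape m n` says m is n rows of n.
def pvEntry (m : List (List Int)) (a b : Nat) : Int := (m.getD a []).getD b 0

def pvShape (m : List (List Int)) (n : Nat) : Prop :=
  m.length = n ∧ ∀ i, i < n → (m.getD i []).length = n

-- contribution of source cell (i,j) with offset d to target (a,b), before/after the tower test
def pvIndNC (t : List (List String)) (n a b i j : Nat) (d : Int × Int) : Int :=
  if 0 ≤ (i : Int) + d.1 ∧ (i : Int) + d.1 < (n : Int) ∧ 0 ≤ (j : Int) + d.2 ∧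
      (j : Int) + d.2 < (n : Int) ∧
      (t.getD ((i : Int) + d.1).toNat []).getD ((j : Int) + d.2).toNat "" ≠ "T" ∧
      ((i : Int) + d.1).toNat = a ∧ ((j : Int) + d.2).toNat = b
  then 10 else 0

def pvInd (t : List (List String)) (n a b i j : Nat) (d : Int × Int) : Int :=
  if (t.getD i []).getD j "" = "T" then pvIndNC t n a b i j d else 0

lemma pvfst (x y : Int) : ((x, y) : Int × Int).1 = x := rfl
lemma pvsnd (x y : Int) : ((x, y) : Int × Int).2 = y := rfl

lemma pvgetD_eq {α : Type} (l : List α) (d : α) (i : Nat) (h : i < l.length) :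
    l.getD i d = l[i] := by
  rw [List.getD_eq_getElem?_getD, List.getElem?_eq_getElem h, Option.getD_some]

lemma pvgetD_modify {α : Type} (l : List α) (x i : Nat) (f : α → α) (d : α) (hi : i < l.length) :
    (l.modify x f).getD i d = if x = i then f (l.getD i d) else l.getD i d := by
  rw [List.getD_eq_getElem?_getD, List.getElem?_modify, List.getElem?_eq_getElem hi]
  by_cases h : x = i <;> simp [h, List.getD_eq_getElem?_getD, List.getElem?_eq_getElem hi]

lemma pvgetD_map_range {α : Type} (n : Nat) (f : Nat → α) (d : α) (i : Nat) (hi : i < n) :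
    ((List.range n).map f).getD i d = f i := by
  rw [List.getD_eq_getElem?_getD]
  simp [List.getElem?_map, List.getElem?_range, hi]

lemma pvShape_add {m : List (List Int)} {n x y : Nat} (h : pvShape m n) :
    pvShape (pvAdd m x y) n := by
  obtain ⟨hl, hr⟩ := h
  refine ⟨by simp [pvAdd, hl], ?_⟩
  intro i hi
  have him : i < m.length := by omega
  rw [pvAdd, pvgetD_modify m x i _ [] him]
  split_ifs with hx
  · rw [List.length_modify]
    exact hr i hi
  · exact hr i hi

lemma pvEntry_add {m : List (List Int)} {n a b x y : Nat} (h : pvShape m n)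
    (ha : a < n) (hb : b < n) :
    pvEntry (pvAdd m x y) a b = pvEntry m a b + (if x = a ∧ y = b then (10:Int) else 0) := by
  obtain ⟨hl, hr⟩ := h
  have ham : a < m.length := by omega
  have hbm : b < (m.getD a []).length := by rw [hr a ha]; omega
  unfold pvEntry pvAdd
  rw [pvgetD_modify m x a _ [] ham]
  by_cases hx : x = a
  · rw [if_pos hx, pvgetD_modify _ y b _ 0 hbm]
    by_cases hy : y = b
    · simp [hx, hy]
    · simp [hx, hy]
  · rw [if_neg hx]; simp [hx]

lemma pvShape_foldl {α : Type} {n : Nat} (f : List (List Int) → α → List (List Int))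
    (hf : ∀ m x, pvShape m n → pvShape (f m x) n) :
    ∀ (L : List α) (m : List (List Int)), pvShape m n → pvShape (L.foldl f m) n := by
  intro L
  induction L with
  | nil => intro m h; simpa using h
  | cons x L ih => intro m h; simpa [List.foldl_cons] using ih _ (hf _ _ h)

lemma pvEntry_foldl {α : Type} {n a b : Nat} (f : List (List Int) → α → List (List Int))
    (g : α → Int)
    (hf : ∀ m x, pvShape m n → pvShape (f m x) n)
    (he : ∀ m x, pvShape m n → pvEntry (f m x) a b = pvEntry m a b + g x) :
    ∀ (L : List α) (m : List (List Int)), pvShape m n →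
      pvEntry (L.foldl f m) a b = pvEntry m a b + (L.map g).sum := by
  intro L
  induction L with
  | nil => intro m h; simp
  | cons x L ih =>
    intro m h
    simp only [List.foldl_cons, List.map_cons, List.sum_cons]
    rw [ih _ (hf _ _ h), he _ _ h]
    ring

lemma pvA_dstep_shape (t : List (List String)) {n : Nat} (i j : Nat)
    (m : List (List Int)) (d : Int × Int) (h : pvShape m n) :
    pvShape (pvA_dstep t n i j m d) n := by
  simp only [pvA_dstep]
  split_ifs
  · exact pvShape_add h
  · exact h

lemma pvA_dstep_entry (t : List (List String)) {n a b : Nat} (i j : Nat)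
    (m : List (List Int)) (d : Int × Int) (h : pvShape m n) (ha : a < n) (hb : b < n) :
    pvEntry (pvA_dstep t n i j m d) a b = pvEntry m a b + pvIndNC t n a b i j d := by
  simp only [pvA_dstep, pvIndNC]
  by_cases h2 : 0 ≤ (i : Int) + d.1 ∧ (i : Int) + d.1 < (n : Int) ∧ 0 ≤ (j : Int) + d.2 ∧
      (j : Int) + d.2 < (n : Int) ∧
      (t.getD ((i : Int) + d.1).toNat []).getD ((j : Int) + d.2).toNat "" ≠ "T" ∧
      ((i : Int) + d.1).toNat = a ∧ ((j : Int) + d.2).toNat = b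
  · have h1 : 0 ≤ (i : Int) + d.1 ∧ (i : Int) + d.1 < (n : Int) ∧ 0 ≤ (j : Int) + d.2 ∧
        (j : Int) + d.2 < (n : Int) ∧
        (t.getD ((i : Int) + d.1).toNat []).getD ((j : Int) + d.2).toNat "" ≠ "T" :=
      ⟨h2.1, h2.2.1, h2.2.2.1, h2.2.2.2.1, h2.2.2.2.2.1⟩
    have hp : ((i : Int) + d.1).toNat = a ∧ ((j : Int) + d.2).toNat = b :=
      ⟨h2.2.2.2.2.2.1, h2.2.2.2.2.2.2⟩
    rw [if_pos h1, if_pos h2, pvEntry_add h ha hb, if_pos hp]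
  · by_cases h1 : 0 ≤ (i : Int) + d.1 ∧ (i : Int) + d.1 < (n : Int) ∧ 0 ≤ (j : Int) + d.2 ∧
        (j : Int) + d.2 < (n : Int) ∧
        (t.getD ((i : Int) + d.1).toNat []).getD ((j : Int) + d.2).toNat "" ≠ "T"
    · have hp : ¬ (((i : Int) + d.1).toNat = a ∧ ((j : Int) + d.2).toNat = b) := fun hp =>
        h2 ⟨h1.1, h1.2.1, h1.2.2.1, h1.2.2.2.1, h1.2.2.2.2, hp.1, hp.2⟩
      rw [if_pos h1, if_neg h2, add_zero, pvEntry_add h ha hb, if_neg hp, add_zero]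
    · rw [if_neg h1, if_neg h2, add_zero]

lemma pvA_jstep_shape (t : List (List String)) {n : Nat} (i : Nat)
    (m : List (List Int)) (j : Nat) (h : pvShape m n) :
    pvShape (pvA_jstep t n i m j) n := by
  simp only [pvA_jstep]
  split_ifs
  · exact pvShape_foldl _ (fun m d hm => pvA_dstep_shape t i j m d hm) _ _ h
  · exact h

lemma pvA_jstep_entry (t : List (List String)) {n a b : Nat} (ha : a < n) (hb : b < n)
    (i : Nat) (m : List (List Int)) (j : Nat) (h : pvShape m n) :
    pvEntry (pvA_jstep t n i m j) a b
      = pvEntry m a b + (pvA_offs.map (pvInd t n a b i j)).sum := by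
  simp only [pvA_jstep]
  by_cases hc : (t.getD i []).getD j "" = "T"
  · rw [if_pos hc]
    rw [pvEntry_foldl (pvA_dstep t n i j) (pvIndNC t n a b i j)
        (fun m d hm => pvA_dstep_shape t i j m d hm)
        (fun m d hm => pvA_dstep_entry t i j m d hm ha hb) pvA_offs m h]
    congr 1
    refine congrArg List.sum (List.map_congr_left ?_)
    intro d _
    unfold pvInd
    rw [if_pos hc]
  · rw [if_neg hc]
    have hz : ∀ d ∈ pvA_offs, pvInd t n a b i j d = 0 := by
      intro d _
      unfold pvInd
      rw [if_neg hc]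
    rw [congrArg List.sum (List.map_congr_left hz)]
    simp

lemma pvA_istep_shape (t : List (List String)) {n : Nat}
    (m : List (List Int)) (i : Nat) (h : pvShape m n) :
    pvShape (pvA_istep t n m i) n := by
  simp only [pvA_istep]
  exact pvShape_foldl _ (fun m j hm => pvA_jstep_shape t i m j hm) _ _ h

lemma pvA_istep_entry (t : List (List String)) {n a b : Nat} (ha : a < n) (hb : b < n)
    (m : List (List Int)) (i : Nat) (h : pvShape m n) :
    pvEntry (pvA_istep t n m i) a b
      = pvEntry m a b
        + ((List.range n).map (fun j => (pvA_offs.map (pvInd t n a b i j)).sum)).sum := by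
  simp only [pvA_istep]
  exact pvEntry_foldl (pvA_jstep t n i) (fun j => (pvA_offs.map (pvInd t n a b i j)).sum)
    (fun m j hm => pvA_jstep_shape t i m j hm)
    (fun m j hm => pvA_jstep_entry t ha hb i m j hm) _ _ h

lemma pvInit_shape (n : Nat) :
    pvShape ((List.range n).map (fun _ => (List.range n).map (fun _ => (0:Int)))) n := by
  constructor
  · simp
  · intro i hi
    rw [pvgetD_map_range n _ [] i hi]
    simp

lemma pvInit_entry (n a b : Nat) (ha : a < n) (hb : b < n) :
    pvEntry ((List.range n).map (fun _ => (List.range n).map (fun _ => (0:Int)))) a b = 0 := by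
  unfold pvEntry
  rw [pvgetD_map_range n _ [] a ha, pvgetD_map_range n _ 0 b hb]

lemma pvA_shape (t : List (List String)) : pvShape (calcular_mapa_dano t) t.length := by
  simp only [calcular_mapa_dano]
  exact pvShape_foldl (pvA_istep t t.length) (fun m i hm => pvA_istep_shape t m i hm)
    _ _ (pvInit_shape t.length)

lemma pvA_entry (t : List (List String)) {a b : Nat} (ha : a < t.length) (hb : b < t.length) :
    pvEntry (calcular_mapa_dano t) a b
      = ((List.range t.length).map (fun i =>
          ((List.range t.length).map (fun j =>
            (pvA_offs.map (pvInd t t.length a b i j)).sum)).sum)).sum := by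
  simp only [calcular_mapa_dano]
  rw [pvEntry_foldl (pvA_istep t t.length)
      (fun i => ((List.range t.length).map (fun j =>
        (pvA_offs.map (pvInd t t.length a b i j)).sum)).sum)
      (fun m i hm => pvA_istep_shape t m i hm)
      (fun m i hm => pvA_istep_entry t ha hb m i hm)
      _ _ (pvInit_shape t.length),
    pvInit_entry t.length a b ha hb, zero_add]

lemma pvsum_map_add {α : Type} (l : List α) (f g : α → Int) :
    (l.map (fun x => f x + g x)).sum = (l.map f).sum + (l.map g).sum := by
  induction l with
  | nil => simp
  | cons x l ih => simp only [List.map_cons, List.sum_cons, ih]; ring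

lemma pvsum2_add (n : Nat) (f g : Nat → Nat → Int) :
    ((List.range n).map (fun i => ((List.range n).map (fun j => f i j + g i j)).sum)).sum
      = ((List.range n).map (fun i => ((List.range n).map (fun j => f i j)).sum)).sum
        + ((List.range n).map (fun i => ((List.range n).map (fun j => g i j)).sum)).sum := by
  have h1 : ∀ i ∈ List.range n, ((List.range n).map (fun j => f i j + g i j)).sum
      = ((List.range n).map (fun j => f i j)).sum + ((List.range n).map (fun j => g i j)).sum :=
    fun i _ => pvsum_map_add _ _ _
  rw [congrArg List.sum (List.map_congr_left h1)]
  exact pvsum_map_add _ _ _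

lemma pvsum_pin1 (c : Int) (i0 : Nat) (n : Nat) :
    ((List.range n).map (fun i => if i = i0 then c else 0)).sum = if i0 < n then c else 0 := by
  induction n with
  | zero => simp
  | succ n ih =>
    rw [List.range_succ, List.map_append, List.sum_append, ih]
    by_cases h1 : i0 < n
    · have h2 : ¬ (n = i0) := by omega
      have h3 : i0 < n + 1 := by omega
      simp [h1, h2, h3]
    · by_cases h2 : n = i0
      · have h3 : i0 < n + 1 := by omega
        simp [h1, h2, h3]
      · have h3 : ¬ (i0 < n + 1) := by omega
        simp [h1, h2, h3]

lemma pvsum_pin2 (n i0 j0 : Nat) (c : Int) :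
    ((List.range n).map (fun i =>
      ((List.range n).map (fun j => if i = i0 ∧ j = j0 then c else 0)).sum)).sum
      = if i0 < n ∧ j0 < n then c else 0 := by
  have h1 : ∀ i ∈ List.range n,
      ((List.range n).map (fun j => if i = i0 ∧ j = j0 then c else 0)).sum
      = if i = i0 then (if j0 < n then c else 0) else 0 := by
    intro i _
    by_cases hi : i = i0
    · subst hi
      have he : (fun j => if i = i ∧ j = j0 then c else 0)
          = (fun j => if j = j0 then c else 0) := by
        funext j; simp
      rw [he, pvsum_pin1]
      simp
    · simp [hi]
  rw [congrArg List.sum (List.map_congr_left h1), pvsum_pin1]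
  by_cases h1 : i0 < n <;> by_cases h2 : j0 < n <;> simp [h1, h2]

lemma pvInd_d1 (t : List (List String)) {n a b : Nat} (ha : a < n) (hb : b < n) :
    ∀ (i j : Nat), pvInd t n a b i j (-1, -1)
      = if i = a + 1 ∧ j = b + 1 then
          (if (t.getD (a + 1) []).getD (b + 1) "" = "T" ∧ (t.getD a []).getD b "" ≠ "T"
           then (10:Int) else 0)
        else 0 := by
  intro i j
  simp only [pvInd, pvIndNC, pvfst, pvsnd]
  by_cases hij : i = a + 1 ∧ j = b + 1
  · obtain ⟨hi, hj⟩ := hij; subst hi; subst hj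
    have hcnd : a + 1 = a + 1 ∧ b + 1 = b + 1 := ⟨rfl, rfl⟩
    rw [if_pos hcnd]
    have e1 : (((a + 1 : Nat) : Int) + -1).toNat = a := by omega
    have e2 : (((b + 1 : Nat) : Int) + -1).toNat = b := by omega
    have hc1 : (0:Int) ≤ ((a + 1 : Nat) : Int) + -1 := by omega
    have hc2 : ((a + 1 : Nat) : Int) + -1 < (n : Int) := by omega
    have hc3 : (0:Int) ≤ ((b + 1 : Nat) : Int) + -1 := by omega
    have hc4 : ((b + 1 : Nat) : Int) + -1 < (n : Int) := by omega
    simp only [e1, e2, eq_true hc1, eq_true hc2, eq_true hc3, eq_true hc4,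
      eq_self_iff_true, true_and, and_true]
    split_ifs <;> first | rfl | tauto
  · rw [if_neg hij]
    by_cases hc : (t.getD i []).getD j "" = "T"
    · rw [if_pos hc]
      split_ifs with hcond
      · obtain ⟨c1, c2, c3, c4, c5, c6, c7⟩ := hcond
        exact absurd ⟨by omega, by omega⟩ hij
      · rfl
    · rw [if_neg hc]

lemma pvInd_d2 (t : List (List String)) {n a b : Nat} (ha : a < n) (hb : b < n) :
    ∀ (i j : Nat), pvInd t n a b i j (-1, 1)
      = if i = a + 1 ∧ j = b - 1 then
          (if 1 ≤ b ∧ (t.getD (a + 1) []).getD (b - 1) "" = "T" ∧ (t.getD a []).getD b "" ≠ "T"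
           then (10:Int) else 0)
        else 0 := by
  intro i j
  simp only [pvInd, pvIndNC, pvfst, pvsnd]
  by_cases hij : i = a + 1 ∧ j = b - 1
  · obtain ⟨hi, hj⟩ := hij; subst hi; subst hj
    have hcnd : a + 1 = a + 1 ∧ b - 1 = b - 1 := ⟨rfl, rfl⟩
    rw [if_pos hcnd]
    by_cases hb1 : 1 ≤ b
    · have e1 : (((a + 1 : Nat) : Int) + -1).toNat = a := by omega
      have e2 : (((b - 1 : Nat) : Int) + 1).toNat = b := by omega
      have hc1 : (0:Int) ≤ ((a + 1 : Nat) : Int) + -1 := by omega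
      have hc2 : ((a + 1 : Nat) : Int) + -1 < (n : Int) := by omega
      have hc3 : (0:Int) ≤ ((b - 1 : Nat) : Int) + 1 := by omega
      have hc4 : ((b - 1 : Nat) : Int) + 1 < (n : Int) := by omega
      simp only [e1, e2, eq_true hb1, eq_true hc1, eq_true hc2, eq_true hc3, eq_true hc4,
        eq_self_iff_true, true_and, and_true]
      split_ifs <;> first | rfl | tauto
    · have hb0 : b = 0 := by omega
      subst hb0
      have hr : ¬ (1 ≤ 0 ∧ (t.getD (a + 1) []).getD (0 - 1) "" = "T" ∧
          (t.getD a []).getD 0 "" ≠ "T") := by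
        rintro ⟨h, -⟩; omega
      rw [if_neg hr]
      split_ifs with h1 h2
      · obtain ⟨c1, c2, c3, c4, c5, c6, c7⟩ := h2
        omega
      · rfl
      · rfl
  · rw [if_neg hij]
    by_cases hc : (t.getD i []).getD j "" = "T"
    · rw [if_pos hc]
      split_ifs with hcond
      · obtain ⟨c1, c2, c3, c4, c5, c6, c7⟩ := hcond
        exact absurd ⟨by omega, by omega⟩ hij
      · rfl
    · rw [if_neg hc]

lemma pvInd_d3 (t : List (List String)) {n a b : Nat} (ha : a < n) (hb : b < n) :
    ∀ (i j : Nat), pvInd t n a b i j (1, -1)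
      = if i = a - 1 ∧ j = b + 1 then
          (if 1 ≤ a ∧ (t.getD (a - 1) []).getD (b + 1) "" = "T" ∧ (t.getD a []).getD b "" ≠ "T"
           then (10:Int) else 0)
        else 0 := by
  intro i j
  simp only [pvInd, pvIndNC, pvfst, pvsnd]
  by_cases hij : i = a - 1 ∧ j = b + 1
  · obtain ⟨hi, hj⟩ := hij; subst hi; subst hj
    have hcnd : a - 1 = a - 1 ∧ b + 1 = b + 1 := ⟨rfl, rfl⟩
    rw [if_pos hcnd]
    by_cases ha1 : 1 ≤ a
    · have e1 : (((a - 1 : Nat) : Int) + 1).toNat = a := by omega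
      have e2 : (((b + 1 : Nat) : Int) + -1).toNat = b := by omega
      have hc1 : (0:Int) ≤ ((a - 1 : Nat) : Int) + 1 := by omega
      have hc2 : ((a - 1 : Nat) : Int) + 1 < (n : Int) := by omega
      have hc3 : (0:Int) ≤ ((b + 1 : Nat) : Int) + -1 := by omega
      have hc4 : ((b + 1 : Nat) : Int) + -1 < (n : Int) := by omega
      simp only [e1, e2, eq_true ha1, eq_true hc1, eq_true hc2, eq_true hc3, eq_true hc4,
        eq_self_iff_true, true_and, and_true]
      split_ifs <;> first | rfl | tauto
    · have ha0 : a = 0 := by omega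
      subst ha0
      have hr : ¬ (1 ≤ 0 ∧ (t.getD (0 - 1) []).getD (b + 1) "" = "T" ∧
          (t.getD 0 []).getD b "" ≠ "T") := by
        rintro ⟨h, -⟩; omega
      rw [if_neg hr]
      split_ifs with h1 h2
      · obtain ⟨c1, c2, c3, c4, c5, c6, c7⟩ := h2
        omega
      · rfl
      · rfl
  · rw [if_neg hij]
    by_cases hc : (t.getD i []).getD j "" = "T"
    · rw [if_pos hc]
      split_ifs with hcond
      · obtain ⟨c1, c2, c3, c4, c5, c6, c7⟩ := hcond
        exact absurd ⟨by omega, by omega⟩ hij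
      · rfl
    · rw [if_neg hc]

lemma pvInd_d4 (t : List (List String)) {n a b : Nat} (ha : a < n) (hb : b < n) :
    ∀ (i j : Nat), pvInd t n a b i j (1, 1)
      = if i = a - 1 ∧ j = b - 1 then
          (if 1 ≤ a ∧ 1 ≤ b ∧ (t.getD (a - 1) []).getD (b - 1) "" = "T" ∧
              (t.getD a []).getD b "" ≠ "T"
           then (10:Int) else 0)
        else 0 := by
  intro i j
  simp only [pvInd, pvIndNC, pvfst, pvsnd]
  by_cases hij : i = a - 1 ∧ j = b - 1
  · obtain ⟨hi, hj⟩ := hij; subst hi; subst hj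
    have hcnd : a - 1 = a - 1 ∧ b - 1 = b - 1 := ⟨rfl, rfl⟩
    rw [if_pos hcnd]
    by_cases ha1 : 1 ≤ a
    · by_cases hb1 : 1 ≤ b
      · have e1 : (((a - 1 : Nat) : Int) + 1).toNat = a := by omega
        have e2 : (((b - 1 : Nat) : Int) + 1).toNat = b := by omega
        have hc1 : (0:Int) ≤ ((a - 1 : Nat) : Int) + 1 := by omega
        have hc2 : ((a - 1 : Nat) : Int) + 1 < (n : Int) := by omega
        have hc3 : (0:Int) ≤ ((b - 1 : Nat) : Int) + 1 := by omega
        have hc4 : ((b - 1 : Nat) : Int) + 1 < (n : Int) := by omega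
        simp only [e1, e2, eq_true ha1, eq_true hb1, eq_true hc1, eq_true hc2, eq_true hc3,
          eq_true hc4, eq_self_iff_true, true_and, and_true]
        split_ifs <;> first | rfl | tauto
      · have hb0 : b = 0 := by omega
        subst hb0
        have hr : ¬ (1 ≤ a ∧ 1 ≤ 0 ∧ (t.getD (a - 1) []).getD (0 - 1) "" = "T" ∧
            (t.getD a []).getD 0 "" ≠ "T") := by
          rintro ⟨-, h, -⟩; omega
        rw [if_neg hr]
        split_ifs with h1 h2
        · obtain ⟨c1, c2, c3, c4, c5, c6, c7⟩ := h2
          omega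
        · rfl
        · rfl
    · have ha0 : a = 0 := by omega
      subst ha0
      have hr : ¬ (1 ≤ 0 ∧ 1 ≤ b ∧ (t.getD (0 - 1) []).getD (b - 1) "" = "T" ∧
          (t.getD 0 []).getD b "" ≠ "T") := by
        rintro ⟨h, -⟩; omega
      rw [if_neg hr]
      split_ifs with h1 h2
      · obtain ⟨c1, c2, c3, c4, c5, c6, c7⟩ := h2
        omega
      · rfl
      · rfl
  · rw [if_neg hij]
    by_cases hc : (t.getD i []).getD j "" = "T"
    · rw [if_pos hc]
      split_ifs with hcond
      · obtain ⟨c1, c2, c3, c4, c5, c6, c7⟩ := hcond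
        exact absurd ⟨by omega, by omega⟩ hij
      · rfl
    · rw [if_neg hc]

set_option maxHeartbeats 1600000 in
lemma pvsum_eq_viz (t : List (List String)) {n a b : Nat} (ha : a < n) (hb : b < n)
    (hT : (t.getD a []).getD b "" ≠ "T") :
    ((if a + 1 < n ∧ b + 1 < n then
        (if (t.getD (a + 1) []).getD (b + 1) "" = "T" ∧ (t.getD a []).getD b "" ≠ "T"
         then (10:Int) else 0) else 0)
      + ((if a + 1 < n ∧ b - 1 < n then
          (if 1 ≤ b ∧ (t.getD (a + 1) []).getD (b - 1) "" = "T" ∧ (t.getD a []).getD b "" ≠ "T"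
           then (10:Int) else 0) else 0)
        + ((if a - 1 < n ∧ b + 1 < n then
            (if 1 ≤ a ∧ (t.getD (a - 1) []).getD (b + 1) "" = "T" ∧ (t.getD a []).getD b "" ≠ "T"
             then (10:Int) else 0) else 0)
          + (if a - 1 < n ∧ b - 1 < n then
              (if 1 ≤ a ∧ 1 ≤ b ∧ (t.getD (a - 1) []).getD (b - 1) "" = "T" ∧
                  (t.getD a []).getD b "" ≠ "T"
               then (10:Int) else 0) else 0))))
    = 10 * pvB_viz t n a b := by
  simp only [pvB_viz, pvB_offs, List.foldl_cons, List.foldl_nil]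
  have w1 : a - 1 < n := by omega
  have w2 : b - 1 < n := by omega
  have e1 : ((a : Int) + -1).toNat = a - 1 := by omega
  have e2 : ((b : Int) + -1).toNat = b - 1 := by omega
  have e3 : ((a : Int) + 1).toNat = a + 1 := by omega
  have e4 : ((b : Int) + 1).toNat = b + 1 := by omega
  have i1 : (0 ≤ (a : Int) + -1) ↔ 1 ≤ a := by omega
  have i2 : (0 ≤ (b : Int) + -1) ↔ 1 ≤ b := by omega
  have i3 : (a : Int) + -1 < (n : Int) := by omega
  have i4 : (b : Int) + -1 < (n : Int) := by omega
  have i5 : (0:Int) ≤ (a : Int) + 1 := by omega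
  have i6 : (0:Int) ≤ (b : Int) + 1 := by omega
  have i7 : ((a : Int) + 1 < (n : Int)) ↔ a + 1 < n := by omega
  have i8 : ((b : Int) + 1 < (n : Int)) ↔ b + 1 < n := by omega
  simp only [e1, e2, e3, e4, i1, i2, i7, i8, eq_true i3, eq_true i4, eq_true i5, eq_true i6,
    eq_true hT, eq_true w1, eq_true w2, true_and, and_true]
  have f1 : (if a + 1 < n ∧ b + 1 < n then
      (if (t.getD (a + 1) []).getD (b + 1) "" = "T" then (10:Int) else 0) else 0)
      = if a + 1 < n ∧ b + 1 < n ∧ (t.getD (a + 1) []).getD (b + 1) "" = "T" then (10:Int)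
        else 0 := by
    split_ifs <;> first | rfl | tauto
  have f2 : (if a + 1 < n then
      (if 1 ≤ b ∧ (t.getD (a + 1) []).getD (b - 1) "" = "T" then (10:Int) else 0) else 0)
      = if a + 1 < n ∧ 1 ≤ b ∧ (t.getD (a + 1) []).getD (b - 1) "" = "T" then (10:Int)
        else 0 := by
    split_ifs <;> first | rfl | tauto
  have f3 : (if b + 1 < n then
      (if 1 ≤ a ∧ (t.getD (a - 1) []).getD (b + 1) "" = "T" then (10:Int) else 0) else 0)
      = if 1 ≤ a ∧ b + 1 < n ∧ (t.getD (a - 1) []).getD (b + 1) "" = "T" then (10:Int)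
        else 0 := by
    split_ifs <;> first | rfl | tauto
  rw [f1, f2, f3]
  split_ifs <;> norm_num

set_option maxHeartbeats 1600000 in
lemma pvCell_eq (t : List (List String)) {a b : Nat} (ha : a < t.length) (hb : b < t.length) :
    pvEntry (calcular_mapa_dano t) a b
      = if (t.getD a []).getD b "" = "T" then 0 else 10 * pvB_viz t t.length a b := by
  rw [pvA_entry t ha hb]
  have hoffs : ∀ i j : Nat, (pvA_offs.map (pvInd t t.length a b i j)).sum
      = pvInd t t.length a b i j (-1, -1)
        + (pvInd t t.length a b i j (-1, 1)
          + (pvInd t t.length a b i j (1, -1) + pvInd t t.length a b i j (1, 1))) := by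
    intro i j
    simp [pvA_offs]
  simp only [hoffs]
  simp only [pvInd_d1 t ha hb, pvInd_d2 t ha hb, pvInd_d3 t ha hb, pvInd_d4 t ha hb]
  simp only [pvsum2_add]
  simp only [pvsum_pin2]
  by_cases hT : (t.getD a []).getD b "" = "T"
  · have h1 : ((t.getD a []).getD b "" ≠ "T") ↔ False := by
      simp only [iff_false, not_not]
      exact hT
    rw [if_pos hT]
    simp only [h1, and_false, if_false, ite_self, add_zero]
  · rw [if_neg hT]
    exact pvsum_eq_viz t ha hb hT

lemma pv_ports_eq (t : List (List String)) :
    calcular_mapa_dano t = calcular_mapa_dano_alt t := by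
  have hsh := pvA_shape t
  have hlenA : (calcular_mapa_dano t).length = t.length := hsh.1
  have hlenB : (calcular_mapa_dano_alt t).length = t.length := by
    simp [calcular_mapa_dano_alt]
  apply List.ext_getElem (by rw [hlenA, hlenB])
  intro a h1 h2
  have ha : a < t.length := by rw [hlenA] at h1; exact h1
  have hrowA : (calcular_mapa_dano t)[a] = (calcular_mapa_dano t).getD a [] :=
    (pvgetD_eq _ [] a h1).symm
  have hrowlen : ((calcular_mapa_dano t).getD a []).length = t.length := hsh.2 a ha
  have hrowB : (calcular_mapa_dano_alt t)[a]
      = (List.range t.length).map (fun b =>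
          if (t.getD a []).getD b "" = "T" then (0:Int) else 10 * pvB_viz t t.length a b) := by
    simp [calcular_mapa_dano_alt]
  apply List.ext_getElem
  · rw [hrowA, hrowlen, hrowB]
    simp
  · intro b hb1 hb2
    have hbn : b < t.length := by
      rw [hrowA, hrowlen] at hb1
      exact hb1
    have eA : (calcular_mapa_dano t)[a][b]'hb1 = pvEntry (calcular_mapa_dano t) a b := by
      unfold pvEntry
      rw [← hrowA, pvgetD_eq _ 0 b hb1]
    have eB : (calcular_mapa_dano_alt t)[a][b]'hb2
        = (if (t.getD a []).getD b "" = "T" then (0:Int) else 10 * pvB_viz t t.length a b) := by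
      rw [List.getElem_of_eq hrowB hb2]
      simp [hbn]
    rw [eA, eB, pvCell_eq t ha hbn]

-- ===== VERDICT (by name: the statement is the Claim_ definition above) =====
theorem calcular_mapa_dano_spec : Claim_equal_calcular_mapa_dano := by
  intro t hdom hpre
  unfold Spec_calcular_mapa_dano
  exact pv_ports_eq t
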